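-- pv_equiv track=rewrite | github.com/AliceInWonderland61/spring2025-python | Week2/week-2-S2-P1.py | navigate_research_station
-- ===== SOURCE A (Python) =====
-- def navigate_research_station(station_layout, observations):
--     #we need a counter variable and a current varialbe
--     #counter to keep track of the total time
--     time=0
--     #current to keep track of where we are and use it to calculate the time to go to the next observation point
--     current=0
--
--
--     for i in range(len(observations)):
--         next_index = station_layout.index(observations[i])
--         time += abs(current - next_index)
--         current = next_index
--
--         if observations[i] in station_layout:
--             current=station_layout.index(observations[i])
--             time+=abs(current-station_layout.index(observations[i]))
--     return time
-- ===== SOURCE B (Python) =====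
-- def navigate_research_station(station_layout, observations):
--     # Different algorithm: instead of summing |current - next| per step, count how
--     # many moves cross each boundary between adjacent layout cells, using a
--     # difference array over boundaries; the total travel time is the total number
--     # of boundary crossings (prefix-summed at the end).
--     pos = {}
--     for i, cell in enumerate(station_layout):
--         if cell not in pos:
--             pos[cell] = i
--     diff = [0] * len(station_layout)
--     cur = 0
--     for obs in observations:
--         nxt = pos[obs]
--         lo, hi = (cur, nxt) if cur <= nxt else (nxt, cur)
--         if lo < hi:
--             diff[lo] += 1
--             diff[hi] -= 1
--         cur = nxt
--     total = 0
--     crossing = 0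
--     for d in diff:
--         crossing += d
--         total += crossing
--     return total
-- ===== Notes on version B (the rewrite author's own statement) =====
-- stated objective: alternative
-- what changed: Replaces per-observation linear .index scans and direct |current-next| accumulation with a boundary-crossing count: a first-index dict built once, a difference array marking each move's interval of crossed boundaries, and a final prefix-sum pass totalling the crossings.
import Mathlib
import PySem

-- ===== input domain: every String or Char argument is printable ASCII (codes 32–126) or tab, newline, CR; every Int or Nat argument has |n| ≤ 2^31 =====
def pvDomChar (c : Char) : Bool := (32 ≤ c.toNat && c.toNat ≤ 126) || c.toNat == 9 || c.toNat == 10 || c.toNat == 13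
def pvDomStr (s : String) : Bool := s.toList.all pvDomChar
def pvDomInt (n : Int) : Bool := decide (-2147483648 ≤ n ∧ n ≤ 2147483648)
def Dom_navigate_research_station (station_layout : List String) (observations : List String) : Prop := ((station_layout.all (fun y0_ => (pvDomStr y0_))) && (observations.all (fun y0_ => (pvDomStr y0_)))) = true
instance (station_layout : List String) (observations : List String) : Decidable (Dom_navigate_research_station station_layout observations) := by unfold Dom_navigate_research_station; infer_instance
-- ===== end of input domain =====

-- B counts, per boundary between adjacent layout cells, how many moves cross it (difference
-- array + final prefix-sum) instead of A's repeated .index scans summing |current-next|;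
-- equivalence is claimed under Pre_ (every observation occurs in the layout).

-- ===== PORT A =====
-- station_layout.index(...) raises ValueError when absent: Pre_ excludes that; '.getD 0' is only
-- reached outside Pre_.  observations[i] with i from range(len(observations)) is always in range,
-- so pyGetD with a dummy default is exact.
def navigate_research_station (station_layout : List String) (observations : List String) : Int :=
  let r := (PySem.List.pyRange 0 (observations.length : Int) 1).foldl
    (fun (st : Int × Int) i =>
      let o := PySem.List.pyGetD observations i ""
      let next_index : Int := ((PySem.List.index? station_layout o).getD 0 : Nat)
      let time := st.1 + |st.2 - next_index|
      let current := next_index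
      if o ∈ station_layout then
        let current' : Int := ((PySem.List.index? station_layout o).getD 0 : Nat)
        (time + |current' - (((PySem.List.index? station_layout o).getD 0 : Nat) : Int)|, current')
      else (time, current))
    (0, 0)
  r.1

-- ===== PORT B =====
-- value → first index, built in one pass over enumerate(station_layout)
def pvFirstIndexDict (station_layout : List String) : PySem.Dict String Int :=
  (PySem.List.enumerate station_layout 0).foldl
    (fun d p => if d.contains p.2 then d else d.insert p.2 p.1) PySem.Dict.empty

-- pos[obs] raises KeyError when absent: Pre_ excludes that; '.getD 0' is only reached outside Pre_.
-- diff = [0]*len → List.replicate; diff[i] read/write → pyGetD/pySetD (indices here are nonneg).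
def navigate_research_station_alt (station_layout : List String) (observations : List String) : Int :=
  let pos := pvFirstIndexDict station_layout
  let st := observations.foldl
    (fun (st : List Int × Int) o =>
      let nxt : Int := (pos.get? o).getD 0
      let lo := if st.2 ≤ nxt then st.2 else nxt
      let hi := if st.2 ≤ nxt then nxt else st.2
      let diff' := if lo < hi then
          let d1 := PySem.List.pySetD st.1 lo (PySem.List.pyGetD st.1 lo 0 + 1)
          PySem.List.pySetD d1 hi (PySem.List.pyGetD d1 hi 0 - 1)
        else st.1
      (diff', nxt))
    ((List.replicate station_layout.length (0 : Int)), 0)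
  let r := st.1.foldl (fun (p : Int × Int) d => (p.1 + (p.2 + d), p.2 + d)) (0, 0)
  r.1

-- ===== PRECONDITION & SPEC =====
-- Pre_: every observation occurs in the layout; otherwise A raises ValueError (and B KeyError).
def Pre_navigate_research_station (station_layout : List String) (observations : List String) : Prop :=
  ∀ o ∈ observations, o ∈ station_layout
instance (station_layout : List String) (observations : List String) : Decidable (Pre_navigate_research_station station_layout observations) := by unfold Pre_navigate_research_station; infer_instance
def pvWitness_navigate_research_station : List String × List String := (["a", "b", "c"], ["c", "a", "b"])

def Spec_navigate_research_station (station_layout : List String) (observations : List String) (out : Int) : Prop := out = navigate_research_station_alt station_layout observations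
instance (station_layout : List String) (observations : List String) (out : Int) : Decidable (Spec_navigate_research_station station_layout observations out) := by unfold Spec_navigate_research_station; infer_instance

-- ===== CLAIM (what is proved, stated in full; the proofs are below) =====
def Claim_equal_navigate_research_station : Prop := ∀ (station_layout : List String) (observations : List String), Dom_navigate_research_station station_layout observations → Pre_navigate_research_station station_layout observations → Spec_navigate_research_station station_layout observations (navigate_research_station station_layout observations)

-- ===== LEMMAS AND PROOFS =====

-- the first-index dict looks up exactly list.index
lemma pvFirstIndexDict_aux (sl : List String) (s : Int) (d : PySem.Dict String Int) (v : String) :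
    ((PySem.List.enumerate sl s).foldl
      (fun d p => if d.contains p.2 then d else d.insert p.2 p.1) d).get? v
    = ((d.get? v).or ((PySem.List.index? sl v).map (fun k : Nat => s + (k : Int)))) := by
  induction sl generalizing s d with
  | nil => simp [PySem.List.enumerate_nil, PySem.List.index?]
  | cons x xs ih =>
    rw [PySem.List.enumerate_cons]
    simp only [List.foldl_cons]
    by_cases hc : d.contains x
    · simp only [hc, ite_true]
      rw [ih]
      by_cases hv : v = x
      · subst hv
        rw [PySem.Dict.contains_eq_isSome_get?] at hc
        obtain ⟨w, hw⟩ := Option.isSome_iff_exists.mp hc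
        simp [hw]
      · rw [PySem.List.index?_cons_of_ne xs (Ne.symm hv)]
        rw [PySem.List.index?_eq_idxOf?]
        cases h : List.idxOf? v xs with
        | none => simp
        | some k =>
          simp only [Option.map_some]
          congr 2
          push_cast
          ring
    · simp only [Bool.not_eq_true] at hc
      simp only [hc, Bool.false_eq_true, if_false]
      rw [ih]
      by_cases hv : v = x
      · subst hv
        have hnone : d.get? v = none := by
          rw [PySem.Dict.contains_eq_isSome_get?] at hc
          simpa using hc
        rw [PySem.Dict.get?_insert_self, hnone, PySem.List.index?_cons_self]
        simp
      · rw [PySem.Dict.get?_insert_of_ne _ _ hv, PySem.List.index?_cons_of_ne xs (Ne.symm hv)]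
        rw [PySem.List.index?_eq_idxOf?]
        cases h : List.idxOf? v xs with
        | none => simp
        | some k =>
          simp only [Option.map_some]
          congr 2
          push_cast
          ring

lemma pvFirstIndexDict_get (sl : List String) (v : String) :
    (pvFirstIndexDict sl).get? v = (PySem.List.index? sl v).map (fun k : Nat => (k : Int)) := by
  unfold pvFirstIndexDict
  rw [pvFirstIndexDict_aux]
  simp [PySem.Dict.get?_empty]

-- weighted sum: pvW c = Σ_k c_k · (c.length - k); this is what the final prefix-sum pass totals
def pvW : List Int → Int
  | [] => 0
  | x :: xs => x * ((xs.length : Int) + 1) + pvW xs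

lemma pvW_replicate (n : Nat) : pvW (List.replicate n (0 : Int)) = 0 := by
  induction n with
  | zero => rfl
  | succ m ih => simp [List.replicate_succ, pvW, ih]

lemma pvW_set (c : List Int) (n : Nat) (v : Int) (h : n < c.length) :
    pvW (c.set n v) = pvW c + (v - c.getD n 0) * ((c.length : Int) - n) := by
  induction c generalizing n with
  | nil => simp at h
  | cons x xs ih =>
    cases n with
    | zero => simp [pvW]; ring
    | succ m =>
      have hm : m < xs.length := by simpa using h
      simp only [List.set_cons_succ, pvW, List.length_set, ih m hm, List.getD_cons_succ,
        List.length_cons]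
      push_cast
      ring

-- the final pass (crossing += d; total += crossing) computes pvW
lemma pvPrefixFold (c : List Int) (t r : Int) :
    (c.foldl (fun (p : Int × Int) d => (p.1 + (p.2 + d), p.2 + d)) (t, r)).1
      = t + r * (c.length : Int) + pvW c := by
  induction c generalizing t r with
  | nil => simp [pvW]
  | cons x xs ih =>
    simp only [List.foldl_cons, ih, pvW, List.length_cons]
    push_cast
    ring

-- canonical per-observation steps of the two programs (after resolving the lookups)
def pvStepA (sl : List String) (st : Int × Int) (o : String) : Int × Int :=
  (st.1 + |st.2 - (((PySem.List.index? sl o).getD 0 : Nat) : Int)|,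
    (((PySem.List.index? sl o).getD 0 : Nat) : Int))

def pvStepB (sl : List String) (st : List Int × Int) (o : String) : List Int × Int :=
  let nxt : Int := (((PySem.List.index? sl o).getD 0 : Nat) : Int)
  let lo := if st.2 ≤ nxt then st.2 else nxt
  let hi := if st.2 ≤ nxt then nxt else st.2
  let diff' := if lo < hi then
      let d1 := PySem.List.pySetD st.1 lo (PySem.List.pyGetD st.1 lo 0 + 1)
      PySem.List.pySetD d1 hi (PySem.List.pyGetD d1 hi 0 - 1)
    else st.1
  (diff', nxt)

-- one step of B changes the weighted sum by exactly |cur - nxt|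
lemma pvStepB_W (sl : List String) (o : String) (diff : List Int) (cur : Int)
    (ho : o ∈ sl) (hlen : diff.length = sl.length)
    (hc0 : 0 ≤ cur) (hc1 : cur < (sl.length : Int) ∨ cur = 0) :
    pvW (pvStepB sl (diff, cur) o).1
      = pvW diff + |cur - (((PySem.List.index? sl o).getD 0 : Nat) : Int)|
    ∧ (pvStepB sl (diff, cur) o).1.length = sl.length
    ∧ (pvStepB sl (diff, cur) o).2 = (((PySem.List.index? sl o).getD 0 : Nat) : Int) := by
  obtain ⟨k, hk⟩ := Option.isSome_iff_exists.mp
    ((PySem.List.index?_isSome_iff (xs := sl) (v := o)).mpr ho)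
  obtain ⟨hklt, -, -⟩ := PySem.List.getElem_of_index?_eq_some hk
  have hkval : ((PySem.List.index? sl o).getD 0 : Nat) = k := by rw [hk]; rfl
  set n : Nat := sl.length with hn
  simp only [pvStepB, hkval]
  by_cases hle : cur ≤ (k : Int)
  · by_cases hlt : cur < (k : Int)
    · have hcurN : cur.toNat < diff.length := by omega
      have hset1 : PySem.List.pySetD diff cur (PySem.List.pyGetD diff cur 0 + 1)
          = diff.set cur.toNat (diff.getD cur.toNat 0 + 1) := by
        rw [PySem.List.pyGetD_of_nonneg diff 0 hc0, PySem.List.pySetD_of_nonneg diff _ hc0]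
      set c1 := diff.set cur.toNat (diff.getD cur.toNat 0 + 1) with hc1def
      have hlen1 : c1.length = diff.length := by simp [hc1def]
      have hW1 : pvW c1 = pvW diff + ((diff.length : Int) - cur.toNat) := by
        rw [hc1def, pvW_set diff cur.toNat _ hcurN]; ring
      have hkc1 : k < c1.length := by omega
      have hset2 : PySem.List.pySetD c1 (k : Int) (PySem.List.pyGetD c1 (k : Int) 0 - 1)
          = c1.set k (c1.getD k 0 - 1) := by
        rw [PySem.List.pyGetD_natCast, PySem.List.pySetD_natCast]
      simp only [hle, if_true, hlt, hset1, hset2]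
      refine ⟨?_, ?_, by trivial⟩
      · rw [pvW_set c1 k _ hkc1, hW1, abs_of_nonpos (show cur - (k : Int) ≤ 0 by omega)]
        have ht : ((cur.toNat : Int)) = cur := Int.toNat_of_nonneg hc0
        rw [hlen1, ht]
        ring
      · simp [List.length_set, hlen1, hlen]
    · have hcc : cur = (k : Int) := le_antisymm hle (by omega)
      subst hcc
      simp only [le_refl, if_true, lt_irrefl, if_false, sub_self, abs_zero, add_zero]
      exact ⟨by trivial, hlen, by trivial⟩
  · -- nxt < cur : lo = k, hi = cur
    have hkc : (k : Int) < cur := by omega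
    have hcpos : (0 : Int) < cur := by omega
    have hcn : cur < (n : Int) := by
      rcases hc1 with h | h
      · exact h
      · omega
    have hcurN : cur.toNat < diff.length := by omega
    have hkd : k < diff.length := by omega
    have hset1 : PySem.List.pySetD diff (k : Int) (PySem.List.pyGetD diff (k : Int) 0 + 1)
        = diff.set k (diff.getD k 0 + 1) := by
      rw [PySem.List.pyGetD_natCast, PySem.List.pySetD_natCast]
    set c1 := diff.set k (diff.getD k 0 + 1) with hc1def
    have hlen1 : c1.length = diff.length := by simp [hc1def]
    have hW1 : pvW c1 = pvW diff + ((diff.length : Int) - k) := by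
      rw [hc1def, pvW_set diff k _ hkd]; ring
    have hcurc1 : cur.toNat < c1.length := by omega
    have hset2 : PySem.List.pySetD c1 cur (PySem.List.pyGetD c1 cur 0 - 1)
        = c1.set cur.toNat (c1.getD cur.toNat 0 - 1) := by
      rw [PySem.List.pyGetD_of_nonneg c1 0 hc0, PySem.List.pySetD_of_nonneg c1 _ hc0]
    simp only [hle, if_false, hkc, if_true, hset1, hset2]
    refine ⟨?_, ?_, by trivial⟩
    · rw [pvW_set c1 cur.toNat _ hcurc1, hW1, abs_of_nonneg (show (0 : Int) ≤ cur - (k : Int) by omega)]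
      have ht : ((cur.toNat : Int)) = cur := Int.toNat_of_nonneg hc0
      rw [hlen1, ht]
      ring
    · simp [List.length_set, hlen1, hlen]

-- main loop correspondence: the weighted sum of B's difference array tracks A's time
lemma pvMain (sl : List String) (obs : List String) (h : ∀ o ∈ obs, o ∈ sl)
    (time cur : Int) (diff : List Int)
    (hlen : diff.length = sl.length) (hW : pvW diff = time)
    (hc0 : 0 ≤ cur) (hc1 : cur < (sl.length : Int) ∨ cur = 0) :
    pvW (obs.foldl (pvStepB sl) (diff, cur)).1 = (obs.foldl (pvStepA sl) (time, cur)).1 := by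
  induction obs generalizing time cur diff with
  | nil => simpa using hW
  | cons o rest ih =>
    have ho : o ∈ sl := h o (List.mem_cons_self)
    obtain ⟨hWB, hlenB, hsndB⟩ := pvStepB_W sl o diff cur ho hlen hc0 hc1
    obtain ⟨k, hk⟩ := Option.isSome_iff_exists.mp
      ((PySem.List.index?_isSome_iff (xs := sl) (v := o)).mpr ho)
    obtain ⟨hklt, -, -⟩ := PySem.List.getElem_of_index?_eq_some hk
    have hkval : ((PySem.List.index? sl o).getD 0 : Nat) = k := by rw [hk]; rfl
    simp only [List.foldl_cons]
    have hB : pvStepB sl (diff, cur) o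
        = ((pvStepB sl (diff, cur) o).1, (((PySem.List.index? sl o).getD 0 : Nat) : Int)) := by
      rw [← hsndB]
    have hA : pvStepA sl (time, cur) o
        = (time + |cur - (((PySem.List.index? sl o).getD 0 : Nat) : Int)|,
            (((PySem.List.index? sl o).getD 0 : Nat) : Int)) := rfl
    rw [hB, hA]
    exact ih (fun x hx => h x (List.mem_cons_of_mem _ hx)) _ _ _ hlenB
      (by rw [hWB, hW]) (Int.natCast_nonneg _) (by left; rw [hkval]; exact_mod_cast hklt)

theorem navigate_research_station_spec : Claim_equal_navigate_research_station := by
  intro sl obs _ hpre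
  unfold Spec_navigate_research_station navigate_research_station navigate_research_station_alt
  simp only []
  rw [PySem.List.foldl_pyRange_zero_pyGetD' obs ""
    (fun (st : Int × Int) o =>
      let next_index : Int := ((PySem.List.index? sl o).getD 0 : Nat)
      let time := st.1 + |st.2 - next_index|
      let current := next_index
      if o ∈ sl then
        let current' : Int := ((PySem.List.index? sl o).getD 0 : Nat)
        (time + |current' - (((PySem.List.index? sl o).getD 0 : Nat) : Int)|, current')
      else (time, current)) (0, 0)]
  -- collapse A's redundant membership branch into pvStepA
  rw [PySem.List.foldl_congr_mem obs _ (pvStepA sl) (0, 0)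
    (by
      intro st o hoobs
      have ho : o ∈ sl := hpre o hoobs
      simp [ho, pvStepA])]
  -- replace B's dict lookup by list.index and use the main correspondence
  rw [PySem.List.foldl_congr_mem obs _ (pvStepB sl) (List.replicate sl.length (0 : Int), 0)
    (by
      intro st o _
      have hpos : ((pvFirstIndexDict sl).get? o).getD 0
          = (((PySem.List.index? sl o).getD 0 : Nat) : Int) := by
        rw [pvFirstIndexDict_get]
        cases PySem.List.index? sl o <;> simp
      simp only [pvStepB, hpos])]
  rw [pvPrefixFold]
  rw [pvMain sl obs hpre 0 0 (List.replicate sl.length (0 : Int)) (by simp)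
    (pvW_replicate sl.length) le_rfl (by right; rfl)]
  ring
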